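-- pv_equiv track=rewrite | github.com/alvinchong-sf/algorithms | code_signal/arcade_the_core/is_tandem_repeat.py | solution
-- ===== SOURCE A (Python) =====
-- def solution(inputString):
--     n = len(inputString)
--     if n == 2:
--         return True if inputString[0] == inputString[1] else False
--
--     for i in range(n-2):
--         for j in range(i+1, n-1):
--             sub_str = inputString[i:j+1]
--             m = j - i + 1
--             if sub_str * 2 == inputString:
--                 return True
--
--     return False
-- ===== SOURCE B (Python) =====
-- def solution(inputString):
--     n = len(inputString)
--     half = n // 2
--     if n == 0 or n % 2 != 0:
--         return False
--     for i in range(half):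
--         if inputString[i] != inputString[i + half]:
--             return False
--     return True
-- ===== Notes on version B (the rewrite author's own statement) =====
-- stated objective: simpler
-- what changed: Replaced A's nested enumeration of every substring (slicing and doubling each) with one linear pass comparing the two halves character by character after an even-length guard.
import Mathlib
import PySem

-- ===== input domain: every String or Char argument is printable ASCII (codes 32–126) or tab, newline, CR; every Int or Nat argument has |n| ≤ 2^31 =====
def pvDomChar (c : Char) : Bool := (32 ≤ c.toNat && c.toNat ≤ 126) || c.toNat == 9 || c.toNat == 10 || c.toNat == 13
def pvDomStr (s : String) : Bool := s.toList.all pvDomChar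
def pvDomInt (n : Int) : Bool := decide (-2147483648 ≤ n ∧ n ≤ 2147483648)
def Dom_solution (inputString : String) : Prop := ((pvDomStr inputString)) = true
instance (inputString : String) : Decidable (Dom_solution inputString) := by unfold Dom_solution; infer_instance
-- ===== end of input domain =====

-- B replaces A's nested enumeration of all substrings (each sliced and doubled) with a single
-- linear half-comparison pass after an even-length guard; same return value on every input.


-- ===== PORT A =====
-- literal transliteration of A on the character list (the two for-loops with early
-- 'return True' become nested List.any over the same ranges)
def solA (l : List Char) : Bool :=
  let n : Int := l.length
  if n = 2 then
    if PySem.List.pyGet? l 0 = PySem.List.pyGet? l 1 then true else false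
  else
    (PySem.List.pyRange 0 (n - 2) 1).any (fun i =>
      (PySem.List.pyRange (i + 1) (n - 1) 1).any (fun j =>
        let sub := PySem.List.slice l (some i) (some (j + 1))
        decide (sub ++ sub = l)))

def solution (inputString : String) : Bool := solA inputString.toList

-- ===== PORT B =====
-- literal transliteration of B: guard, then one pass over range(half) with early
-- 'return False' on a mismatch (List.all)
def solB (l : List Char) : Bool :=
  let n : Int := l.length
  let half : Int := PySem.Int.floordiv n 2
  if n = 0 ∨ PySem.Int.mod n 2 ≠ 0 then false
  else
    (PySem.List.pyRange 0 half 1).all (fun i =>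
      decide (PySem.List.pyGet? l i = PySem.List.pyGet? l (i + half)))

def solution_alt (inputString : String) : Bool := solB inputString.toList

-- ===== PRECONDITION & SPEC =====
def Spec_solution (inputString : String) (out : Bool) : Prop := out = solution_alt inputString
instance (inputString : String) (out : Bool) : Decidable (Spec_solution inputString out) := by unfold Spec_solution; infer_instance

-- ===== CLAIM (what is proved, stated in full; the proofs are below) =====
def Claim_equal_solution : Prop := ∀ (inputString : String), Dom_solution inputString → Spec_solution inputString (solution inputString)

-- ===== LEMMAS AND PROOFS =====

-- the common characterisation: a non-empty even-length string whose halves coincide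
def halvesEq (l : List Char) : Prop :=
  l ≠ [] ∧ l.length % 2 = 0 ∧ List.take (l.length / 2) l = List.drop (l.length / 2) l

theorem take_eq_drop_iff (l : List Char) (h : Nat) (hlen : l.length = 2 * h) :
    List.take h l = List.drop h l ↔ ∀ k < h, l[k]? = l[k + h]? := by
  constructor
  · intro heq k hk
    have := congrArg (fun t => t[k]?) heq
    simpa [List.getElem?_take, hk, List.getElem?_drop, Nat.add_comm] using this
  · intro hall
    apply List.ext_getElem?
    intro k
    by_cases hk : k < h
    · simpa [List.getElem?_take, hk, List.getElem?_drop, Nat.add_comm] using hall k hk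
    · have h1 : (List.take h l)[k]? = none := by
        rw [List.getElem?_eq_none_iff]; simp [hlen]; omega
      have h2 : (List.drop h l)[k]? = none := by
        rw [List.getElem?_eq_none_iff]; simp [hlen]; omega
      rw [h1, h2]

theorem solA_iff (l : List Char) : solA l = true ↔ halvesEq l := by
  unfold solA halvesEq
  by_cases hn2 : (l.length : Int) = 2
  · have h2 : l.length = 2 := by exact_mod_cast hn2
    match l, h2 with
    | [a, b], _ =>
      simp [PySem.List.pyGet?, PySem.List.pyIdx?]
  · simp only [hn2, if_false, List.any_eq_true, PySem.List.mem_pyRange_one,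
      decide_eq_true_eq]
    constructor
    · rintro ⟨i, ⟨hi0, hi1⟩, j, ⟨hj0, hj1⟩, hsub⟩
      set t := PySem.List.slice l (some i) (some (j + 1)) with ht
      have hlen : l.length = 2 * t.length := by
        have := congrArg List.length hsub
        simp at this; omega
      have hnz : l.length ≠ 0 := by
        have : (0:Int) < (l.length:Int) - 2 := lt_of_le_of_lt hi0 hi1
        omega
      refine ⟨by simpa using List.length_pos_iff.mp (by omega), by omega, ?_⟩
      have hm : l.length / 2 = t.length := by omega
      rw [hm, ← hsub, List.take_left, List.drop_left]
    · rintro ⟨hne, heven, heq⟩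
      have hnz : l.length ≠ 0 := by simpa using hne
      have hne2 : l.length ≠ 2 := by intro h; exact hn2 (by exact_mod_cast h)
      set m := l.length / 2 with hm
      have hlen : l.length = 2 * m := by omega
      have hm2 : 2 ≤ m := by omega
      refine ⟨0, ⟨le_refl _, by omega⟩, (m : Int) - 1,
        ⟨by omega, by omega⟩, ?_⟩
      have hslice : PySem.List.slice l (some 0) (some ((m:Int) - 1 + 1)) = List.take m l := by
        rw [show ((m:Int) - 1 + 1) = (m:Int) by ring]
        rw [PySem.List.slice_zero_start, PySem.List.slice_to_natCast]
      rw [hslice]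
      nth_rewrite 2 [heq]
      exact List.take_append_drop m l

theorem solB_iff (l : List Char) : solB l = true ↔ halvesEq l := by
  unfold solB halvesEq
  have hmod : PySem.Int.mod (l.length : Int) 2 = ((l.length % 2 : Nat) : Int) := by
    exact_mod_cast PySem.Int.mod_natCast l.length 2
  have hdiv : PySem.Int.floordiv (l.length : Int) 2 = ((l.length / 2 : Nat) : Int) := by
    exact_mod_cast PySem.Int.floordiv_natCast l.length 2
  by_cases hg : (l.length : Int) = 0 ∨ PySem.Int.mod (l.length : Int) 2 ≠ 0
  · simp only [hg, if_true, Bool.false_eq_true, false_iff]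
    rintro ⟨hne, heven, -⟩
    have hnz : l.length ≠ 0 := by simpa using hne
    rcases hg with h | h
    · omega
    · rw [hmod] at h; omega
  · have hnz : l.length ≠ 0 := by
      intro h; exact hg (Or.inl (by exact_mod_cast h))
    have heven : l.length % 2 = 0 := by
      by_contra h
      exact hg (Or.inr (by rw [hmod]; exact_mod_cast by omega))
    simp only [hg, if_false, List.all_eq_true, PySem.List.mem_pyRange_one,
      decide_eq_true_eq, hdiv]
    have hlen : l.length = 2 * (l.length / 2) := by omega
    rw [take_eq_drop_iff l (l.length / 2) hlen]
    constructor
    · intro hall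
      refine ⟨by simpa using List.length_pos_iff.mp (by omega), heven, ?_⟩
      intro k hk
      have := hall (k : Int) ⟨by positivity, by exact_mod_cast hk⟩
      rw [PySem.List.pyGet?_natCast] at this
      rw [show ((k:Int) + ((l.length / 2 : Nat) : Int)) = ((k + l.length / 2 : Nat) : Int) by
        push_cast; ring, PySem.List.pyGet?_natCast] at this
      exact this
    · rintro ⟨-, -, hall⟩ i ⟨hi0, hi1⟩
      obtain ⟨k, rfl⟩ := Int.eq_ofNat_of_zero_le hi0
      rw [PySem.List.pyGet?_natCast,
        show ((k:Int) + ((l.length / 2 : Nat) : Int)) = ((k + l.length / 2 : Nat) : Int) by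
          push_cast; ring, PySem.List.pyGet?_natCast]
      exact hall k (by exact_mod_cast hi1)

-- ===== VERDICT (by name: the statement is the Claim_ definition above) =====
theorem solution_spec : Claim_equal_solution := by
  intro s _
  unfold Spec_solution solution solution_alt
  rw [Bool.eq_iff_iff, solA_iff, solB_iff]
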